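-- pv_equiv track=rewrite | github.com/Nghia03092004/nghia03092004.github.io | project_euler_unified/problem_971/solution.py | count_interior_primes
-- ===== SOURCE A (Python) =====
-- def count_interior_primes(N, is_p):
--     """Count pairs (a,b) with 1<=a,b<=N and a^2+b^2 prime. Also collect small ones."""
--     count = 0
--     small_a, small_b = [], []
--     for a in range(1, N + 1):
--         for b in range(1, N + 1):
--             if is_p[a * a + b * b]:
--                 count += 1
--                 if a <= 80 and b <= 80:
--                     small_a.append(a)
--                     small_b.append(b)
--     return count, small_a, small_b
-- ===== SOURCE B (Python) =====
-- def count_interior_primes(N, is_p):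
--     count = sum(1 for a in range(1, N + 1) for b in range(1, N + 1) if is_p[a * a + b * b])
--     M = min(N, 80)
--     small_a = [a for a in range(1, M + 1) for b in range(1, M + 1) if is_p[a * a + b * b]]
--     small_b = [b for a in range(1, M + 1) for b in range(1, M + 1) if is_p[a * a + b * b]]
--     return count, small_a, small_b
-- ===== Notes on version B (the rewrite author's own statement) =====
-- stated objective: alternative
-- what changed: Replaces A's single interleaved nested loop with mixed state (counter plus two conditionally-appended lists) by three independent aggregate passes: a pure count over the full N x N grid, and two comprehensions over the min(N,80) x min(N,80) subgrid, eliminating the inner a<=80/b<=80 branch.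
import Mathlib
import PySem

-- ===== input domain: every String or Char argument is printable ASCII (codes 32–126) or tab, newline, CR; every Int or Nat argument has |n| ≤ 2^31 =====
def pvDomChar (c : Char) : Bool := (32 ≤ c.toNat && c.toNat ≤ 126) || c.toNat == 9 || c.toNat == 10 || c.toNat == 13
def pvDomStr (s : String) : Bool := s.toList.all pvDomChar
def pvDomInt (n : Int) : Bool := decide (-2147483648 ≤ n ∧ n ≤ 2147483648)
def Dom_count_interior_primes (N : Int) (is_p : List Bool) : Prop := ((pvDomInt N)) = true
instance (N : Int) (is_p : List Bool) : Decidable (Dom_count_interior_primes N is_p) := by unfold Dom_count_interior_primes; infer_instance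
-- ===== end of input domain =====

-- B replaces A's single interleaved nested loop (counter + two conditionally-appended lists in one
-- mixed state) by three independent aggregate passes: a pure count over the full N×N grid and two
-- comprehensions over the min(N,80)×min(N,80) subgrid; objective: alternative decomposition.


-- ===== PORT A =====
-- is_p[a*a+b*b] is ported as pyGetD _ _ false; Pre_ guarantees the index is in range, where this
-- agrees with Python (outside Pre_ Python raises IndexError).
def count_interior_primes (N : Int) (is_p : List Bool) : Int × List Int × List Int :=
  (PySem.List.pyRange 1 (N + 1) 1).foldl
    (fun st a =>
      (PySem.List.pyRange 1 (N + 1) 1).foldl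
        (fun st b =>
          if PySem.List.pyGetD is_p (a * a + b * b) false then
            if a ≤ 80 ∧ b ≤ 80 then (st.1 + 1, st.2.1 ++ [a], st.2.2 ++ [b])
            else (st.1 + 1, st.2.1, st.2.2)
          else st) st)
    (0, [], [])

-- ===== PORT B =====
def count_interior_primes_alt (N : Int) (is_p : List Bool) : Int × List Int × List Int :=
  let count : Int :=
    ((PySem.List.pyRange 1 (N + 1) 1).flatMap (fun a =>
      (PySem.List.pyRange 1 (N + 1) 1).filter (fun b =>
        PySem.List.pyGetD is_p (a * a + b * b) false))).length
  let M : Int := min N 80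
  let small_a := (PySem.List.pyRange 1 (M + 1) 1).flatMap (fun a =>
      ((PySem.List.pyRange 1 (M + 1) 1).filter (fun b =>
        PySem.List.pyGetD is_p (a * a + b * b) false)).map (fun _ => a))
  let small_b := (PySem.List.pyRange 1 (M + 1) 1).flatMap (fun a =>
      (PySem.List.pyRange 1 (M + 1) 1).filter (fun b =>
        PySem.List.pyGetD is_p (a * a + b * b) false))
  (count, small_a, small_b)

-- ===== PRECONDITION & SPEC =====
-- Pre_ excludes exactly the inputs where Python A raises IndexError: for N ≥ 1 the largest index
-- read is 2*N*N, so is_p must be longer than that.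
def Pre_count_interior_primes (N : Int) (is_p : List Bool) : Prop :=
  N ≤ 0 ∨ 2 * N * N < (is_p.length : Int)
instance (N : Int) (is_p : List Bool) : Decidable (Pre_count_interior_primes N is_p) := by
  unfold Pre_count_interior_primes; infer_instance
def pvWitness_count_interior_primes : Int × List Bool :=
  (2, [false, false, true, false, false, true, false, false, true])
def Spec_count_interior_primes (N : Int) (is_p : List Bool) (out : Int × List Int × List Int) : Prop := out = count_interior_primes_alt N is_p
instance (N : Int) (is_p : List Bool) (out : Int × List Int × List Int) : Decidable (Spec_count_interior_primes N is_p out) := by unfold Spec_count_interior_primes; infer_instance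

-- ===== CLAIM (what is proved, stated in full; the proofs are below) =====
def Claim_equal_count_interior_primes : Prop := ∀ (N : Int) (is_p : List Bool), Dom_count_interior_primes N is_p → Pre_count_interior_primes N is_p → Spec_count_interior_primes N is_p (count_interior_primes N is_p)

-- ===== LEMMAS AND PROOFS =====

-- A's inner loop over an arbitrary list bs, from an arbitrary state.
theorem innerA_eq (is_p : List Bool) (a : Int) (bs : List Int) (st : Int × List Int × List Int) :
    bs.foldl
      (fun st b =>
        if PySem.List.pyGetD is_p (a * a + b * b) false then
          if a ≤ 80 ∧ b ≤ 80 then (st.1 + 1, st.2.1 ++ [a], st.2.2 ++ [b])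
          else (st.1 + 1, st.2.1, st.2.2)
        else st) st
    = (st.1 + ((bs.filter (fun b => PySem.List.pyGetD is_p (a * a + b * b) false)).length : Int),
       st.2.1 ++ (if a ≤ 80 then
         ((bs.filter (fun b => PySem.List.pyGetD is_p (a * a + b * b) false && decide (b ≤ 80))).map
           (fun _ => a)) else []),
       st.2.2 ++ (if a ≤ 80 then
         (bs.filter (fun b => PySem.List.pyGetD is_p (a * a + b * b) false && decide (b ≤ 80)))
         else [])) := by
  induction bs generalizing st with
  | nil => simp
  | cons b bs ih =>
    rw [List.foldl_cons, ih]
    by_cases hg : PySem.List.pyGetD is_p (a * a + b * b) false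
    · by_cases ha : a ≤ 80
      · by_cases hb : b ≤ 80
        · refine Prod.ext ?_ (Prod.ext ?_ ?_) <;> simp [hg, ha, hb]
          ring
        · refine Prod.ext ?_ (Prod.ext ?_ ?_) <;> simp [hg, ha, hb]
          ring
      · refine Prod.ext ?_ (Prod.ext ?_ ?_) <;> simp [hg, ha]
        ring
    · refine Prod.ext ?_ (Prod.ext ?_ ?_) <;> simp [hg]

-- A's outer loop over an arbitrary list `as`, from an arbitrary state.
theorem outerA_eq (N : Int) (is_p : List Bool) (as : List Int) (st : Int × List Int × List Int) :
    as.foldl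
      (fun st a =>
        (PySem.List.pyRange 1 (N + 1) 1).foldl
          (fun st b =>
            if PySem.List.pyGetD is_p (a * a + b * b) false then
              if a ≤ 80 ∧ b ≤ 80 then (st.1 + 1, st.2.1 ++ [a], st.2.2 ++ [b])
              else (st.1 + 1, st.2.1, st.2.2)
            else st) st) st
    = (st.1 + ((as.map (fun a =>
         ((PySem.List.pyRange 1 (N + 1) 1).filter (fun b =>
           PySem.List.pyGetD is_p (a * a + b * b) false)).length)).sum : Int),
       st.2.1 ++ (as.filter (fun a => decide (a ≤ 80))).flatMap (fun a =>
         (((PySem.List.pyRange 1 (N + 1) 1).filter (fun b =>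
           PySem.List.pyGetD is_p (a * a + b * b) false && decide (b ≤ 80))).map (fun _ => a))),
       st.2.2 ++ (as.filter (fun a => decide (a ≤ 80))).flatMap (fun a =>
         ((PySem.List.pyRange 1 (N + 1) 1).filter (fun b =>
           PySem.List.pyGetD is_p (a * a + b * b) false && decide (b ≤ 80))))) := by
  induction as generalizing st with
  | nil => simp
  | cons a as ih =>
    rw [List.foldl_cons, innerA_eq, ih]
    by_cases ha : a ≤ 80
    · refine Prod.ext ?_ (Prod.ext ?_ ?_) <;> simp [ha]
      ring
    · refine Prod.ext ?_ (Prod.ext ?_ ?_) <;> simp [ha]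
      ring

theorem filter_le80 (N : Int) :
    (PySem.List.pyRange 1 (N + 1) 1).filter (fun a => decide (a ≤ 80))
      = PySem.List.pyRange 1 (min N 80 + 1) 1 := by
  by_cases h : N ≤ 80
  · rw [min_eq_left h]
    apply List.filter_eq_self.mpr
    intro x hx
    have := (PySem.List.mem_pyRange_one).mp hx
    simp; omega
  · rw [min_eq_right (by omega)]
    rw [PySem.List.pyRange_one_append 1 81 (N + 1) (by omega) (by omega)]
    rw [List.filter_append]
    have h1 : (PySem.List.pyRange 1 81 1).filter (fun a => decide (a ≤ 80))
        = PySem.List.pyRange 1 81 1 := by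
      apply List.filter_eq_self.mpr
      intro x hx
      have := (PySem.List.mem_pyRange_one).mp hx
      simp; omega
    have h2 : (PySem.List.pyRange 81 (N + 1) 1).filter (fun a => decide (a ≤ 80)) = [] := by
      apply List.filter_eq_nil_iff.mpr
      intro x hx
      have := (PySem.List.mem_pyRange_one).mp hx
      simp; omega
    rw [h1, h2, List.append_nil]
    norm_num

theorem filter_g_le80 (N : Int) (is_p : List Bool) (a : Int) :
    (PySem.List.pyRange 1 (N + 1) 1).filter (fun b =>
        PySem.List.pyGetD is_p (a * a + b * b) false && decide (b ≤ 80))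
      = (PySem.List.pyRange 1 (min N 80 + 1) 1).filter (fun b =>
        PySem.List.pyGetD is_p (a * a + b * b) false) := by
  rw [← filter_le80, List.filter_filter]

-- ===== VERDICT (by name: the statement is the Claim_ definition above) =====
theorem count_interior_primes_spec : Claim_equal_count_interior_primes := by
  intro N is_p _ _
  unfold Spec_count_interior_primes count_interior_primes count_interior_primes_alt
  rw [outerA_eq]
  refine Prod.ext ?_ (Prod.ext ?_ ?_)
  · simp [List.length_flatMap]
  · simp only [List.nil_append, filter_g_le80, filter_le80]
  · simp only [List.nil_append, filter_g_le80, filter_le80]
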